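-- pv_equiv track=rewrite | github.com/fleurvanl/AOC2024 | day07.py | process_pipe
-- ===== SOURCE A (Python) =====
-- def process_pipe(combination, numbers):
--     temp_operators = list(combination).copy()
--     temp_numbers = numbers.copy()
--     i = 0
--     while i < len(temp_operators):
--         if temp_operators[i] == '|':
--             temp_numbers[i] = temp_numbers[i] + temp_numbers[i + 1]
--             del temp_operators[i]
--             del temp_numbers[i + 1]
--         i += 1
--     return temp_numbers, temp_operators
-- ===== SOURCE B (Python) =====
-- def process_pipe(combination, numbers):
--     # One forward pass over the operator string computing kept operators and
--     # merge positions (in the ORIGINAL numbers list), then one pass stitching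
--     # the result together with slices -- no in-place deletions.
--     kept_ops = []
--     merges = []
--     v = 0  # index into `numbers` of the next unconsumed number
--     k = 0
--     n = len(combination)
--     while k < n:
--         c = combination[k]
--         if c == '|':
--             merges.append(v)
--             v += 2
--             if k + 1 < n:
--                 kept_ops.append(combination[k + 1])
--             k += 2
--         else:
--             kept_ops.append(c)
--             v += 1
--             k += 1
--     out = []
--     prev = 0
--     for m in merges:
--         out.extend(numbers[prev:m])
--         out.append(numbers[m] + numbers[m + 1])
--         prev = m + 2
--     out.extend(numbers[prev:])
--     return out, kept_ops
-- ===== Notes on version B (the rewrite author's own statement) =====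
-- stated objective: alternative
-- what changed: Instead of A's while-loop that repeatedly deletes elements in place from copies of both lists, B does one forward scan of the operator string recording kept operators and merge positions, then assembles the reduced number list in a single slicing pass; the skip-after-merge index behaviour is reproduced by advancing two operator positions per merge.
import Mathlib
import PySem

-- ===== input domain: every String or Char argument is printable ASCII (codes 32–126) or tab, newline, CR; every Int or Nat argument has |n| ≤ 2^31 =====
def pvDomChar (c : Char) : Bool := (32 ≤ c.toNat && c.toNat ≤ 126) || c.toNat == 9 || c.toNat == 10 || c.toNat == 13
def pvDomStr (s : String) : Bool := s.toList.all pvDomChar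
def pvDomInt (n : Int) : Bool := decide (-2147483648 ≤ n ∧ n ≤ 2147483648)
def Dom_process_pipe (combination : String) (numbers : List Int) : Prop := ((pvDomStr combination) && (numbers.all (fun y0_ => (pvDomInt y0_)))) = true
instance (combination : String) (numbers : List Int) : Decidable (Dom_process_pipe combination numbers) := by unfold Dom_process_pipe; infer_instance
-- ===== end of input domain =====

-- B: a single forward scan plus one slicing pass instead of A's delete-in-place while loop (alternative structure; return values only — A copies its inputs, so neither mutates).

-- ===== PORT A =====
-- helper: Python returns the operators as a list of 1-character strings; both ports
-- work over List Char internally and convert at the end.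
def pvMkS (c : Char) : String := String.mk [c]

-- the while-loop of A: i is the loop index; deletions are List.eraseIdx, the
-- element reads temp_numbers[i] / temp_numbers[i+1] are getElem? (none = IndexError).
def aLoop (ops : List Char) (nums : List Int) (i : Nat) : Option (List Int × List Char) :=
  if h : i < ops.length then
    if ops[i] = '|' then
      match nums[i]?, nums[i+1]? with
      | some a, some b => aLoop (ops.eraseIdx i) (((nums.set i (a + b))).eraseIdx (i+1)) (i+1)
      | _, _ => none
    else aLoop ops nums (i+1)
  else some (nums, ops)
termination_by ops.length - i
decreasing_by
  · simp [List.length_eraseIdx, h]; omega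
  · omega

def process_pipe (combination : String) (numbers : List Int) : List Int × List String :=
  match aLoop combination.toList numbers 0 with
  | some (ns, os) => (ns, os.map pvMkS)
  | none => ([], [])   -- unreachable under Pre_ (Python raises IndexError here)

-- ===== PORT B =====
-- phase 1 of Source B: one scan of the operators collecting merge positions (indices
-- into the original numbers) and the kept operators; after a '|' the next
-- operator is kept unexamined (k += 2) and two numbers are consumed (v += 2).
def bScan : List Char → Nat → List Nat × List Char
  | [], _ => ([], [])
  | c :: rest, v =>
    if c = '|' then
      match rest with
      | [] => ([v], [])
      | o :: rest' =>
        let p := bScan rest' (v+2)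
        (v :: p.1, o :: p.2)
    else
      let p := bScan rest (v+1)
      (p.1, c :: p.2)

-- phase 2 of Source B: stitch the output numbers together; numbers[prev:m] is
-- (drop prev).take (m-prev), exact since 0 ≤ prev ≤ m; numbers[m], numbers[m+1]
-- are getElem? (none = IndexError).
def bNums : List Nat → List Int → Nat → Option (List Int)
  | [], numbers, prev => some (numbers.drop prev)   -- numbers[prev:], exact since 0 ≤ prev
  | m :: ms, numbers, prev =>
    match numbers[m]?, numbers[m+1]? with
    | some a, some b =>
      match bNums ms numbers (m+2) with
      | some tail => some ((numbers.drop prev).take (m - prev) ++ (a + b) :: tail)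
      | none => none
    | _, _ => none

def process_pipe_alt (combination : String) (numbers : List Int) : List Int × List String :=
  let p := bScan combination.toList 0
  match bNums p.1 numbers 0 with
  | some ns => (ns, p.2.map pvMkS)
  | none => ([], [])   -- unreachable under Pre_ (Python raises IndexError here)

-- ===== PRECONDITION & SPEC =====
-- the positions (in the original numbers list) of the '|' operators that the
-- algorithm actually applies (an operator right after an applied '|' is skipped)
def pipePos : List Char → Nat → List Nat
  | [], _ => []
  | c :: rest, v =>
    if c = '|' then
      match rest with
      | [] => [v]
      | _ :: rest' => v :: pipePos rest' (v+2)
    else pipePos rest (v+1)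

-- pipePos is a shape function of the operator STRING alone (like counting bracket
-- depth): the positions, in the original number list, of the '|' operators that get
-- applied (one right after an applied '|' is skipped).  Neither port uses it.
-- Pre_ excludes exactly the inputs on which Python A raises IndexError: some applied
-- '|' needs the two numbers at positions m, m+1 and the number list is too short.
def Pre_process_pipe (combination : String) (numbers : List Int) : Prop :=
  ∀ m ∈ pipePos combination.toList 0, m + 2 ≤ numbers.length

instance (combination : String) (numbers : List Int) : Decidable (Pre_process_pipe combination numbers) := by
  unfold Pre_process_pipe; infer_instance

def pvWitness_process_pipe : String × List Int := ("+|*", [1, 2, 3, 4])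

def Spec_process_pipe (combination : String) (numbers : List Int) (out : List Int × List String) : Prop := out = process_pipe_alt combination numbers
instance (combination : String) (numbers : List Int) (out : List Int × List String) : Decidable (Spec_process_pipe combination numbers out) := by unfold Spec_process_pipe; infer_instance

-- ===== CLAIM (what is proved, stated in full; the proofs are below) =====
def Claim_equal_process_pipe : Prop := ∀ (combination : String) (numbers : List Int), Dom_process_pipe combination numbers → Pre_process_pipe combination numbers → Spec_process_pipe combination numbers (process_pipe combination numbers)

-- ===== LEMMAS AND PROOFS =====

-- common functional description of the result, used to relate the two ports
def specNums : List Char → List Int → List Int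
  | [], ns => ns
  | c :: rest, ns =>
    if c = '|' then
      match ns, rest with
      | a :: b :: ns', _ :: rest' => (a + b) :: specNums rest' ns'
      | a :: b :: ns', [] => (a + b) :: ns'
      | _, _ => []
    else
      match ns with
      | x :: ns' => x :: specNums rest ns'
      | [] => []

def specOps : List Char → List Char
  | [] => []
  | c :: rest =>
    if c = '|' then
      match rest with
      | [] => []
      | o :: rest' => o :: specOps rest'
    else c :: specOps rest

-- rewrite equations (the compiled pattern match hides the obvious ones from simp)
theorem pp_nil (v : Nat) : pipePos [] v = [] := rfl
theorem pp_pipe1 (v : Nat) : pipePos ['|'] v = [v] := rfl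
theorem pp_pipe (o : Char) (r : List Char) (v : Nat) :
    pipePos ('|' :: o :: r) v = v :: pipePos r (v+2) := rfl
theorem pp_neg (c : Char) (r : List Char) (v : Nat) (h : ¬ c = '|') :
    pipePos (c :: r) v = pipePos r (v+1) := by
  rw [pipePos.eq_def]; simp [h]

theorem so_nil : specOps [] = [] := rfl
theorem so_pipe1 : specOps ['|'] = [] := rfl
theorem so_pipe (o : Char) (r : List Char) : specOps ('|' :: o :: r) = o :: specOps r := rfl
theorem so_neg (c : Char) (r : List Char) (h : ¬ c = '|') :
    specOps (c :: r) = c :: specOps r := by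
  rw [specOps.eq_def]; simp [h]

theorem sn_nil (ns : List Int) : specNums [] ns = ns := rfl
theorem sn_pipe1 (a b : Int) (ns : List Int) : specNums ['|'] (a :: b :: ns) = (a + b) :: ns := rfl
theorem sn_pipe (o : Char) (r : List Char) (a b : Int) (ns : List Int) :
    specNums ('|' :: o :: r) (a :: b :: ns) = (a + b) :: specNums r ns := rfl
theorem sn_neg (c : Char) (r : List Char) (x : Int) (ns : List Int) (h : ¬ c = '|') :
    specNums (c :: r) (x :: ns) = x :: specNums r ns := by
  rw [specNums.eq_def]; simp [h]

theorem specNums_nil (cs : List Char) : specNums cs [] = [] := by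
  cases cs with
  | nil => rfl
  | cons c rest =>
      rw [specNums.eq_def]
      by_cases h : c = '|'
      · subst h; cases rest <;> simp
      · simp [h]

theorem bs_pipe (o : Char) (r : List Char) (v : Nat) :
    bScan ('|' :: o :: r) v = (v :: (bScan r (v+2)).1, o :: (bScan r (v+2)).2) := rfl
theorem bs_neg (c : Char) (r : List Char) (v : Nat) (h : ¬ c = '|') :
    bScan (c :: r) v = ((bScan r (v+1)).1, c :: (bScan r (v+1)).2) := by
  rw [bScan.eq_def]; simp [h]

theorem pipePos_shift (cs : List Char) (v w : Nat) :
    pipePos cs (v + w) = (pipePos cs w).map (v + ·) := by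
  induction cs, w using pipePos.induct with
  | case1 w => rfl
  | case2 w => rfl
  | case3 w o rest' ih =>
      rw [pp_pipe, pp_pipe, show v + w + 2 = v + (w + 2) from by omega, ih]
      rfl
  | case4 c rest w h ih =>
      rw [pp_neg _ _ _ h, pp_neg _ _ _ h, show v + w + 1 = v + (w + 1) from by omega, ih]

theorem pipePos_nil_nopipe (cs : List Char) (v : Nat) (h : pipePos cs v = []) :
    ∀ c ∈ cs, c ≠ '|' := by
  induction cs, v using pipePos.induct with
  | case1 w => simp
  | case2 w => simp [pp_pipe1] at h
  | case3 w o rest' ih => simp [pp_pipe] at h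
  | case4 c rest w hc ih =>
      rw [pp_neg _ _ _ hc] at h
      intro x hx
      rcases List.mem_cons.mp hx with rfl | hx
      · exact hc
      · exact ih h x hx

theorem specOps_nopipe (cs : List Char) (h : ∀ c ∈ cs, c ≠ '|') : specOps cs = cs := by
  induction cs with
  | nil => rfl
  | cons c rest ih =>
      have hc : c ≠ '|' := h c List.mem_cons_self
      rw [so_neg _ _ hc, ih (fun x hx => h x (List.mem_cons_of_mem _ hx))]

-- prefix-index helpers
theorem set_append_len {α : Type} (p s : List α) (k : Nat) (x : α) :
    (p ++ s).set (p.length + k) x = p ++ s.set k x := by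
  induction p with
  | nil => simp
  | cons a p ih => simpa [List.set, Nat.succ_add] using ih

theorem eraseIdx_append_len {α : Type} (p s : List α) (k : Nat) :
    (p ++ s).eraseIdx (p.length + k) = p ++ s.eraseIdx k := by
  induction p with
  | nil => simp
  | cons a p ih => simpa [List.eraseIdx, Nat.succ_add] using ih

theorem getElem?_append_len {α : Type} (p s : List α) (k : Nat) :
    (p ++ s)[p.length + k]? = s[k]? := by
  rw [List.getElem?_append_right (by omega)]
  congr 1
  omega

-- if no '|' remains at or after i, A's loop returns its state unchanged
theorem aLoop_nopipe (ops : List Char) (nums : List Int) (i : Nat)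
    (h : ∀ j, i ≤ j → (hj : j < ops.length) → ops[j] ≠ '|') :
    aLoop ops nums i = some (nums, ops) := by
  rw [aLoop]
  split
  · next hi =>
      rw [if_neg (h i le_rfl hi)]
      exact aLoop_nopipe ops nums (i+1) (fun j hj hjl => h j (by omega) hjl)
  · rfl
termination_by ops.length - i

-- main invariant for A's loop
theorem aLoop_spec (suffix kept : List Char) (pre rest : List Int)
    (hlen : pre.length = kept.length)
    (hsaf : ∀ m ∈ pipePos suffix 0, m + 2 ≤ rest.length) :
    aLoop (kept ++ suffix) (pre ++ rest) kept.length
      = some (pre ++ specNums suffix rest, kept ++ specOps suffix) := by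
  induction suffix using specOps.induct generalizing kept pre rest with
  | case1 =>
      rw [aLoop]
      rw [dif_neg (by simp)]
      rw [sn_nil, so_nil]
  | case2 =>
      have h2 : 2 ≤ rest.length := hsaf 0 (by rw [pp_pipe1]; exact List.mem_cons_self)
      obtain ⟨a, b, rest2, rfl⟩ : ∃ a b rest2, rest = a :: b :: rest2 := by
        match rest, h2 with
        | a :: b :: rest2, _ => exact ⟨a, b, rest2, rfl⟩
      rw [aLoop]
      have hil : kept.length < (kept ++ ['|']).length := by simp
      rw [dif_pos hil]
      have hop : (kept ++ ['|'])[kept.length]'hil = '|' := by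
        rw [List.getElem_append_right (by omega)]; simp
      rw [if_pos hop]
      have hg0 : (pre ++ a :: b :: rest2)[kept.length]? = some a := by
        have := getElem?_append_len pre (a :: b :: rest2) 0
        simpa [hlen] using this
      have hg1 : (pre ++ a :: b :: rest2)[kept.length + 1]? = some b := by
        have := getElem?_append_len pre (a :: b :: rest2) 1
        simpa [hlen] using this
      rw [hg0, hg1]
      dsimp only
      have hset : (pre ++ a :: b :: rest2).set kept.length (a + b)
          = pre ++ (a + b) :: b :: rest2 := by
        have := set_append_len pre (a :: b :: rest2) 0 (a + b)
        simpa [hlen] using this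
      have herN : (pre ++ (a + b) :: b :: rest2).eraseIdx (kept.length + 1)
          = pre ++ (a + b) :: rest2 := by
        have := eraseIdx_append_len pre ((a + b) :: b :: rest2) 1
        simpa [hlen, List.eraseIdx] using this
      have herO : (kept ++ ['|']).eraseIdx kept.length = kept := by
        have := eraseIdx_append_len kept ['|'] 0
        simpa [List.eraseIdx] using this
      rw [hset, herN, herO]
      rw [aLoop]
      rw [dif_neg (by omega)]
      rw [sn_pipe1, so_pipe1, List.append_nil]
  | case3 o rest' ih =>
      have h2 : 2 ≤ rest.length := hsaf 0 (by rw [pp_pipe]; exact List.mem_cons_self)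
      obtain ⟨a, b, rest2, rfl⟩ : ∃ a b rest2, rest = a :: b :: rest2 := by
        match rest, h2 with
        | a :: b :: rest2, _ => exact ⟨a, b, rest2, rfl⟩
      rw [aLoop]
      have hil : kept.length < (kept ++ '|' :: o :: rest').length := by simp
      rw [dif_pos hil]
      have hop : (kept ++ '|' :: o :: rest')[kept.length]'hil = '|' := by
        rw [List.getElem_append_right (by omega)]; simp
      rw [if_pos hop]
      have hg0 : (pre ++ a :: b :: rest2)[kept.length]? = some a := by
        have := getElem?_append_len pre (a :: b :: rest2) 0
        simpa [hlen] using this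
      have hg1 : (pre ++ a :: b :: rest2)[kept.length + 1]? = some b := by
        have := getElem?_append_len pre (a :: b :: rest2) 1
        simpa [hlen] using this
      rw [hg0, hg1]
      dsimp only
      have hset : (pre ++ a :: b :: rest2).set kept.length (a + b)
          = pre ++ (a + b) :: b :: rest2 := by
        have := set_append_len pre (a :: b :: rest2) 0 (a + b)
        simpa [hlen] using this
      have herN : (pre ++ (a + b) :: b :: rest2).eraseIdx (kept.length + 1)
          = pre ++ (a + b) :: rest2 := by
        have := eraseIdx_append_len pre ((a + b) :: b :: rest2) 1
        simpa [hlen, List.eraseIdx] using this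
      have herO : (kept ++ '|' :: o :: rest').eraseIdx kept.length = kept ++ o :: rest' := by
        have := eraseIdx_append_len kept ('|' :: o :: rest') 0
        simpa [List.eraseIdx] using this
      rw [hset, herN, herO]
      have hsaf' : ∀ m ∈ pipePos rest' 0, m + 2 ≤ rest2.length := by
        intro m hm
        have hmem : m + 2 ∈ pipePos rest' 2 := by
          have hsh := pipePos_shift rest' 2 0
          rw [hsh]
          exact List.mem_map.mpr ⟨m, hm, by omega⟩
        have h3 := hsaf (m + 2) (by rw [pp_pipe]; exact List.mem_cons_of_mem _ hmem)
        simp only [List.length_cons] at h3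
        omega
      have hrec := ih (kept ++ [o]) (pre ++ [a + b]) rest2 (by simp [hlen]) hsaf'
      rw [show kept ++ o :: rest' = (kept ++ [o]) ++ rest' from by simp,
          show pre ++ (a + b) :: rest2 = (pre ++ [a + b]) ++ rest2 from by simp,
          show kept.length + 1 = (kept ++ [o]).length from by simp,
          hrec]
      rw [sn_pipe, so_pipe]
      simp
  | case4 c rest0 hc ih =>
      cases rest with
      | nil =>
          have hnp : pipePos rest0 1 = [] := by
            rcases h : pipePos rest0 1 with _ | ⟨m, ms⟩
            · rfl
            · have h3 := hsaf m (by rw [pp_neg _ _ _ hc, h]; exact List.mem_cons_self)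
              simp at h3
          have hnopipe : ∀ x ∈ c :: rest0, x ≠ '|' := by
            intro x hx
            rcases List.mem_cons.mp hx with rfl | hx
            · exact hc
            · exact pipePos_nil_nopipe rest0 1 hnp x hx
          rw [aLoop_nopipe _ _ _ (fun j hj hjl => by
            have hlt : j - kept.length < (c :: rest0).length := by
              simp only [List.length_append, List.length_cons] at hjl ⊢
              omega
            have heq : (kept ++ c :: rest0)[j]'hjl = (c :: rest0)[j - kept.length]'hlt :=
              List.getElem_append_right (by omega)
            rw [heq]
            exact hnopipe _ (List.getElem_mem _))]
          rw [specNums_nil, specOps_nopipe (c :: rest0) hnopipe]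
      | cons x rest2 =>
          rw [aLoop]
          have hil : kept.length < (kept ++ c :: rest0).length := by simp
          rw [dif_pos hil]
          have hop : (kept ++ c :: rest0)[kept.length]'hil = c := by
            rw [List.getElem_append_right (by omega)]; simp
          rw [hop, if_neg hc]
          have hsaf' : ∀ m ∈ pipePos rest0 0, m + 2 ≤ rest2.length := by
            intro m hm
            have hmem : m + 1 ∈ pipePos rest0 1 := by
              have hsh := pipePos_shift rest0 1 0
              rw [hsh]
              exact List.mem_map.mpr ⟨m, hm, by omega⟩
            have h3 := hsaf (m + 1) (by rw [pp_neg _ _ _ hc]; exact hmem)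
            simp only [List.length_cons] at h3
            omega
          have hrec := ih (kept ++ [c]) (pre ++ [x]) rest2 (by simp [hlen]) hsaf'
          rw [show kept ++ c :: rest0 = (kept ++ [c]) ++ rest0 from by simp,
              show pre ++ x :: rest2 = (pre ++ [x]) ++ rest2 from by simp,
              show kept.length + 1 = (kept ++ [c]).length from by simp,
              hrec]
          rw [sn_neg _ _ _ _ hc, so_neg _ _ hc]
          simp
-- B-side lemmas
theorem bScan_fst (cs : List Char) (v : Nat) : (bScan cs v).1 = pipePos cs v := by
  induction cs, v using pipePos.induct with
  | case1 w => rfl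
  | case2 w => rfl
  | case3 w o rest' ih => rw [bs_pipe, pp_pipe]; simpa using ih
  | case4 c rest w h ih => rw [bs_neg _ _ _ h, pp_neg _ _ _ h]; simpa using ih

theorem bScan_snd (cs : List Char) (v : Nat) : (bScan cs v).2 = specOps cs := by
  induction cs, v using pipePos.induct with
  | case1 w => rfl
  | case2 w => rfl
  | case3 w o rest' ih => rw [bs_pipe, so_pipe]; simpa using ih
  | case4 c rest w h ih => rw [bs_neg _ _ _ h, so_neg _ _ h]; simpa using ih

theorem bNums_spec (cs : List Char) (v : Nat) (numbers : List Int) (prev : Nat)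
    (hpv : prev ≤ v)
    (hsaf : ∀ m ∈ pipePos cs v, m + 2 ≤ numbers.length) :
    bNums (pipePos cs v) numbers prev
      = some ((numbers.drop prev).take (v - prev) ++ specNums cs (numbers.drop v)) := by
  induction cs, v using pipePos.induct generalizing prev with
  | case1 v =>
      rw [pp_nil, sn_nil, bNums]
      congr 1
      conv_lhs => rw [show numbers.drop prev
        = (numbers.drop prev).take (v - prev) ++ (numbers.drop prev).drop (v - prev) from
          (List.take_append_drop _ _).symm]
      rw [List.drop_drop]
      congr 2
      omega
  | case2 v =>
      have h2 : v + 2 ≤ numbers.length := hsaf v (by rw [pp_pipe1]; exact List.mem_cons_self)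
      have hv : v < numbers.length := by omega
      have hv1 : v + 1 < numbers.length := by omega
      rw [pp_pipe1, bNums]
      rw [List.getElem?_eq_getElem hv, List.getElem?_eq_getElem hv1]
      dsimp only
      rw [bNums]
      have hdrop : numbers.drop v = numbers[v] :: numbers[v+1] :: numbers.drop (v+2) := by
        rw [List.drop_eq_getElem_cons hv, List.drop_eq_getElem_cons hv1]
      rw [hdrop, sn_pipe1]
  | case3 v o rest' ih =>
      have h2 : v + 2 ≤ numbers.length := hsaf v (by rw [pp_pipe]; exact List.mem_cons_self)
      have hv : v < numbers.length := by omega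
      have hv1 : v + 1 < numbers.length := by omega
      rw [pp_pipe, bNums]
      rw [List.getElem?_eq_getElem hv, List.getElem?_eq_getElem hv1]
      dsimp only
      have hsaf' : ∀ m ∈ pipePos rest' (v+2), m + 2 ≤ numbers.length := by
        intro m hm
        exact hsaf m (by rw [pp_pipe]; exact List.mem_cons_of_mem _ hm)
      rw [ih (v+2) le_rfl hsaf']
      have hdrop : numbers.drop v = numbers[v] :: numbers[v+1] :: numbers.drop (v+2) := by
        rw [List.drop_eq_getElem_cons hv, List.drop_eq_getElem_cons hv1]
      rw [hdrop, sn_pipe]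
      simp
  | case4 c rest v h ih =>
      have hsaf' : ∀ m ∈ pipePos rest (v+1), m + 2 ≤ numbers.length := by
        intro m hm
        exact hsaf m (by rw [pp_neg _ _ _ h]; exact hm)
      rw [pp_neg _ _ _ h]
      rw [ih prev (by omega) hsaf']
      by_cases hv : v < numbers.length
      · have hdrop : numbers.drop v = numbers[v] :: numbers.drop (v+1) :=
          List.drop_eq_getElem_cons hv
        have htake : (numbers.drop prev).take (v + 1 - prev)
            = (numbers.drop prev).take (v - prev) ++ [numbers[v]] := by
          rw [show v + 1 - prev = (v - prev) + 1 from by omega, List.take_succ]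
          congr 1
          rw [List.getElem?_drop, show prev + (v - prev) = v from by omega,
              List.getElem?_eq_getElem hv]
          rfl
        rw [htake, hdrop, sn_neg _ _ _ _ h]
        simp
      · have hv' : numbers.length ≤ v := by omega
        have hd1 : numbers.drop v = [] := List.drop_eq_nil_of_le hv'
        have hd2 : numbers.drop (v+1) = [] := List.drop_eq_nil_of_le (by omega)
        have ht1 : (numbers.drop prev).take (v - prev) = numbers.drop prev :=
          List.take_of_length_le (by simp; omega)
        have ht2 : (numbers.drop prev).take (v + 1 - prev) = numbers.drop prev :=
          List.take_of_length_le (by simp; omega)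
        rw [hd1, hd2, ht1, ht2, specNums_nil, specNums_nil]

-- ===== VERDICT (by name: the statement is the Claim_ definition above) =====
theorem process_pipe_spec : Claim_equal_process_pipe := by
  intro combination numbers _ hpre
  unfold Spec_process_pipe process_pipe process_pipe_alt
  have hA := aLoop_spec combination.toList [] [] numbers rfl hpre
  simp only [List.nil_append, List.length_nil] at hA
  have hB := bNums_spec combination.toList 0 numbers 0 le_rfl hpre
  simp only [List.drop_zero, Nat.sub_zero, List.take_zero, List.nil_append] at hB
  simp only [hA, bScan_fst, bScan_snd, hB]
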